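-- pv_equiv track=rewrite | github.com/shawinsoranakom/CodeSnippets | ComplexMethod/cm003263.py | get_cross_attention_token_mask
-- ===== SOURCE A (Python) =====
-- def get_cross_attention_token_mask(input_ids: list[int], image_token_id: int) -> list[list[int]]:
--     """
--     Generate a cross-attention token mask for image tokens in the input sequence.
--
--     This function identifies the positions of image tokens in the input sequence and creates
--     a mask that defines which subsequent tokens each image token should attend to.
--
--     Args:
--         input_ids (list[int]): A list of token ids representing the input sequence.
--         image_token_id (int): The id of the token used to represent images in the sequence.
--
--     Returns:
--         list[list[int]]: A list of [start, end] pairs, where each pair represents the range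
--         of tokens an image token should attend to.
--
--     Notes:
--         - If no image tokens are present, an empty list is returned.
--         - For a single image token, it attends to all subsequent tokens until the end of the sequence.
--         - For multiple image tokens, each attends to tokens up to the next image token or the end of the sequence.
--         - Consecutive image tokens are treated as a group and attend to all subsequent tokens together.
--     """
--
--     image_token_locations = [i for i, token in enumerate(input_ids) if token == image_token_id]
--
--     if len(image_token_locations) == 0:
--         return []
--
--     # only one image present, unmask until end of sequence
--     if len(image_token_locations) == 1:
--         return [[image_token_locations[0], -1]]
--
--     vision_masks = [[loc1, loc2] for loc1, loc2 in zip(image_token_locations[:-1], image_token_locations[1:])]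
--
--     # last image will attend to all subsequent text
--     vision_masks.append([image_token_locations[-1], len(input_ids)])
--
--     # if there are two or more consecutive vision tokens,
--     # they should all attend to all subsequent
--     # text present
--     last_mask_end = vision_masks[-1][1]
--     for vision_mask in vision_masks[::-1]:
--         if vision_mask[0] == vision_mask[1] - 1:
--             vision_mask[1] = last_mask_end
--         last_mask_end = vision_mask[1]
--
--     return vision_masks
-- ===== SOURCE B (Python) =====
-- def get_cross_attention_token_mask(input_ids: list[int], image_token_id: int) -> list[list[int]]:
--     locs = [i for i, token in enumerate(input_ids) if token == image_token_id]
--     if not locs: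
--         return []
--     if len(locs) == 1:
--         return [[locs[0], -1]]
--     # single forward pass: group locations into maximal consecutive runs;
--     # when a run ends, every token in it attends up to the next run's start,
--     # and the final run attends up to the end of the sequence.
--     masks = []
--     run = [locs[0]]
--     for loc in locs[1:]:
--         if loc == run[-1] + 1:
--             run.append(loc)
--         else:
--             masks.extend([r, loc] for r in run)
--             run = [loc]
--     masks.extend([r, len(input_ids)] for r in run)
--     return masks
-- ===== Notes on version B (the rewrite author's own statement) =====
-- stated objective: simpler
-- what changed: Replaces A's zip-pairs construction followed by a reversed in-place end-propagation loop with a single forward pass that groups image-token locations into maximal consecutive runs and flushes each run with its end (next run's start, or the sequence length for the last run).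
import Mathlib
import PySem

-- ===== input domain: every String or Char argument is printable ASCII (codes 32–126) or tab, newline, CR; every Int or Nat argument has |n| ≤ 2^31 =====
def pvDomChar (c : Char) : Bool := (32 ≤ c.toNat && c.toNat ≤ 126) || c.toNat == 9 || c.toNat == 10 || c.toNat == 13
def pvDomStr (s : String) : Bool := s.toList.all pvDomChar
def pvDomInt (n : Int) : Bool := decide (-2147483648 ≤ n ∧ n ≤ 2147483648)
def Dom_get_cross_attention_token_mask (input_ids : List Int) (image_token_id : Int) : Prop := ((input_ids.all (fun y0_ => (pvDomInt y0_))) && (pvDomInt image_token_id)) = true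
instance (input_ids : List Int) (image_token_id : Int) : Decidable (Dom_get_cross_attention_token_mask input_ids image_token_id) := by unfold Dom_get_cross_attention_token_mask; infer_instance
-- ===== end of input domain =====

-- B replaces A's zip-pairs construction plus backward in-place propagation loop by a single
-- forward pass that groups the image-token locations into maximal consecutive runs (simpler).

-- ===== PORT A =====

-- the locations comprehension shared by both Pythons:
-- [i for i, token in enumerate(input_ids) if token == image_token_id]
def pvLocs (input_ids : List Int) (image_token_id : Int) : List Int :=
  (PySem.List.enumerate input_ids).filterMap
    (fun p => if p.2 = image_token_id then some p.1 else none)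

-- A's final loop 'for vision_mask in vision_masks[::-1]: …' threading last_mask_end;
-- applied to the REVERSED mask list, result later reversed back (in-place mutation modelled).
def pvBackLoop : Int → List (Int × Int) → List (Int × Int)
  | _, [] => []
  | lastEnd, (a, b) :: rest =>
    let b' := if a = b - 1 then lastEnd else b
    (a, b') :: pvBackLoop b' rest

def get_cross_attention_token_mask (input_ids : List Int) (image_token_id : Int) : List (List Int) :=
  let locs := pvLocs input_ids image_token_id
  if locs.length = 0 then []
  else if locs.length = 1 then [[locs.headI, -1]]
  else
    -- locs[:-1] = dropLast, locs[1:] = tail (exact for these slices)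
    let masks := (locs.dropLast.zip locs.tail) ++ [(locs.getLast!, (input_ids.length : Int))]
    let lastEnd := masks.getLast!.2
    ((pvBackLoop lastEnd masks.reverse).reverse).map (fun p => [p.1, p.2])

-- ===== PORT B =====

-- B's forward pass over locs[1:] carrying (finished masks, current consecutive run)
def pvRunStep (st : List (List Int) × List Int) (loc : Int) : List (List Int) × List Int :=
  if loc = st.2.getLast! + 1 then (st.1, st.2 ++ [loc])
  else (st.1 ++ st.2.map (fun r => [r, loc]), [loc])

def get_cross_attention_token_mask_alt (input_ids : List Int) (image_token_id : Int) : List (List Int) :=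
  let locs := pvLocs input_ids image_token_id
  if locs.length = 0 then []
  else if locs.length = 1 then [[locs.headI, -1]]
  else
    let st := locs.tail.foldl pvRunStep ([], [locs.headI])
    st.1 ++ st.2.map (fun r => [r, (input_ids.length : Int)])

-- ===== PRECONDITION & SPEC =====
def Spec_get_cross_attention_token_mask (input_ids : List Int) (image_token_id : Int) (out : List (List Int)) : Prop := out = get_cross_attention_token_mask_alt input_ids image_token_id
instance (input_ids : List Int) (image_token_id : Int) (out : List (List Int)) : Decidable (Spec_get_cross_attention_token_mask input_ids image_token_id out) := by unfold Spec_get_cross_attention_token_mask; infer_instance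

-- ===== CLAIM (what is proved, stated in full; the proofs are below) =====
def Claim_equal_get_cross_attention_token_mask : Prop := ∀ (input_ids : List Int) (image_token_id : Int), Dom_get_cross_attention_token_mask input_ids image_token_id → Spec_get_cross_attention_token_mask input_ids image_token_id (get_cross_attention_token_mask input_ids image_token_id)

-- ===== LEMMAS AND PROOFS =====

-- reference: the correct end position for each location, defined by head recursion
def pvEnds : List Int → Int → List (Int × Int)
  | [], _ => []
  | [a], n => [(a, n)]
  | a :: b :: rest, n =>
    let tail := pvEnds (b :: rest) n
    (a, if a = b - 1 then tail.headI.2 else b) :: tail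

def pvZipMasks (l : List Int) (n : Int) : List (Int × Int) :=
  l.dropLast.zip l.tail ++ [(l.getLast!, n)]

lemma pvEnds_ne_nil (a : Int) (xs : List Int) (n : Int) : pvEnds (a :: xs) n ≠ [] := by
  cases xs <;> simp [pvEnds]

lemma pvEnds_head_fst (a : Int) (xs : List Int) (n : Int) :
    (pvEnds (a :: xs) n).headI.1 = a := by
  cases xs <;> simp [pvEnds]

lemma pvZipMasks_cons (a b : Int) (rest : List Int) (n : Int) :
    pvZipMasks (a :: b :: rest) n = (a, b) :: pvZipMasks (b :: rest) n := by
  simp [pvZipMasks]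

lemma pvZipMasks_getLast (l : List Int) (n : Int) :
    (pvZipMasks l n).getLast! = (l.getLast!, n) := by
  simp [pvZipMasks]

lemma pvBackLoop_concat (xs : List (Int × Int)) (e a b : Int) :
    pvBackLoop e (xs ++ [(a, b)]) =
      pvBackLoop e xs ++
        [(a, if a = b - 1 then (((pvBackLoop e xs).getLast?.map Prod.snd).getD e) else b)] := by
  induction xs generalizing e with
  | nil => simp [pvBackLoop]
  | cons hd tl ih =>
    obtain ⟨c, d⟩ := hd
    simp only [List.cons_append, pvBackLoop, ih]
    cases htl : pvBackLoop (if c = d - 1 then e else d) tl with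
    | nil =>
      simp [htl]
    | cons x xs' =>
      cases hy : (x :: xs').getLast? with
      | none => simp [List.getLast?_eq_none_iff] at hy
      | some y => simp [hy, List.getLast?_cons_cons]

lemma pvA_char (rest : List Int) (a : Int) (n : Int) :
    (pvBackLoop n (pvZipMasks (a :: rest) n).reverse).reverse = pvEnds (a :: rest) n := by
  induction rest generalizing a with
  | nil => simp [pvZipMasks, pvBackLoop, pvEnds]
  | cons b rest' ih =>
    have hzm := pvZipMasks_cons a b rest' n
    rw [hzm]
    simp only [List.reverse_cons]
    rw [pvBackLoop_concat]
    have hrev : (pvBackLoop n (pvZipMasks (b :: rest') n).reverse) = (pvEnds (b :: rest') n).reverse := by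
      rw [← ih b]; simp
    rw [hrev]
    have hne := pvEnds_ne_nil b rest' n
    have hlast : ((pvEnds (b :: rest') n).reverse.getLast?.map Prod.snd).getD n
        = (pvEnds (b :: rest') n).headI.2 := by
      cases hE : pvEnds (b :: rest') n with
      | nil => exact absurd hE hne
      | cons y ys => simp [List.getLast?_reverse]
    rw [hlast]
    simp [pvEnds]

def pvPairsOf (l : List (Int × Int)) : List (List Int) := l.map (fun p => [p.1, p.2])

-- B-side invariant: folding the run step with a pending nonempty consecutive run r++[a]
lemma pvB_char (xs : List Int) (r : List Int) (a : Int) (M : List (List Int)) (n : Int) :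
    (let st := xs.foldl pvRunStep (M, r ++ [a]);
      st.1 ++ st.2.map (fun x => [x, n])) =
    M ++ (r ++ [a]).map (fun x => [x, (pvEnds (a :: xs) n).headI.2])
      ++ pvPairsOf ((pvEnds (a :: xs) n).tail) := by
  induction xs generalizing r a M with
  | nil => simp [pvEnds, pvPairsOf]
  | cons x xs' ih =>
    simp only [List.foldl_cons]
    cases hE : pvEnds (x :: xs') n with
    | nil => exact absurd hE (pvEnds_ne_nil _ _ _)
    | cons z zs =>
      have hz : z.1 = x := by
        have := pvEnds_head_fst x xs' n
        rw [hE] at this; simpa using this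
      by_cases hx : x = a + 1
      · have hcond : a = x - 1 := by omega
        have hstep : pvRunStep (M, r ++ [a]) x = (M, (r ++ [a]) ++ [x]) := by
          simp [pvRunStep, hx]
        rw [hstep]
        have hih := ih (r ++ [a]) x M
        simp only at hih
        rw [hih, hE]
        have hEa : pvEnds (a :: x :: xs') n = (a, z.2) :: z :: zs := by
          simp [pvEnds, hE, hcond, List.headI]
        rw [hEa]
        simp [pvPairsOf, hz, List.headI]
      · have hcond : ¬ (a = x - 1) := by omega
        have hstep : pvRunStep (M, r ++ [a]) x =
            (M ++ (r ++ [a]).map (fun v => [v, x]), [x]) := by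
          simp [pvRunStep, hx]
        rw [hstep]
        have hih := ih [] x (M ++ (r ++ [a]).map (fun v => [v, x]))
        simp only [List.nil_append] at hih
        rw [hih, hE]
        have hEa : pvEnds (a :: x :: xs') n = (a, x) :: z :: zs := by
          simp [pvEnds, hE, hcond]
        rw [hEa]
        simp [pvPairsOf, hz, List.headI]

-- ===== VERDICT (by name: the statement is the Claim_ definition above) =====
theorem get_cross_attention_token_mask_spec : Claim_equal_get_cross_attention_token_mask := by
  intro input_ids image_token_id _
  show _ = _
  unfold get_cross_attention_token_mask get_cross_attention_token_mask_alt
  cases hl : pvLocs input_ids image_token_id with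
  | nil => simp
  | cons a rest =>
    cases rest with
    | nil => simp
    | cons b rest' =>
      simp only [List.length_cons, List.headI, List.tail_cons]
      have h0 : ¬ (rest'.length + 1 + 1 = 0) := by omega
      have h1 : ¬ (rest'.length + 1 + 1 = 1) := by omega
      simp only [h0, h1, if_false]
      set n : Int := (input_ids.length : Int) with hn
      -- A side
      have hmasks : (a :: b :: rest').dropLast.zip (b :: rest')
          ++ [((a :: b :: rest').getLast!, n)] = pvZipMasks (a :: b :: rest') n := rfl
      rw [hmasks, pvZipMasks_getLast]
      have hA := pvA_char (b :: rest') a n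
      simp only [hA]
      -- B side
      have hB := pvB_char (b :: rest') [] a [] n
      simp only [List.nil_append] at hB
      rw [hB]
      -- both equal pvPairsOf (pvEnds (a :: b :: rest') n)
      cases hE : pvEnds (a :: (b :: rest')) n with
      | nil => exact absurd hE (pvEnds_ne_nil _ _ _)
      | cons z zs =>
        have hz : z.1 = a := by
          have := pvEnds_head_fst a (b :: rest') n
          rw [hE] at this; simpa using this
        simp [pvPairsOf, List.headI, ← hz]
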